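-- pv_equiv track=rewrite | github.com/tarundev92/Machine-Learning-for-prediction-of-child-growth | all_classifier.py | merge_feat_count_list
-- ===== SOURCE A (Python) =====
-- def merge_feat_count_list(old_feat, new_feat):
--     for feat in new_feat:
--         old_data = list(filter(lambda item:item[0] == feat, old_feat))
--         if old_data:
--             old_feat_index = old_feat.index(old_data[0])
--             old_feat[old_feat_index] = (feat, old_feat[old_feat_index][1] + 1)
--         else:
--             old_feat.append((feat, 1))
--     return old_feat
-- ===== SOURCE B (Python) =====
-- def merge_feat_count_list(old_feat, new_feat):
--     # Count all new features in one pass, then do one merge pass over old_feat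
--     # (mutates old_feat in place, like the original) and append the leftovers.
--     counts = {}
--     for feat in new_feat:
--         counts[feat] = counts.get(feat, 0) + 1
--     for i in range(len(old_feat)):
--         feat = old_feat[i][0]
--         if feat in counts:
--             old_feat[i] = (feat, old_feat[i][1] + counts.pop(feat))
--     for feat, c in counts.items():
--         old_feat.append((feat, c))
--     return old_feat
-- ===== Notes on version B (the rewrite author's own statement) =====
-- stated objective: faster
-- what changed: A scans old_feat twice (filter + .index) for every occurrence in new_feat; B builds a count dict of new_feat in one pass, then does a single indexed pass over old_feat consuming matching counts with pop, and appends the leftover counts in insertion order.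
import Mathlib
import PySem

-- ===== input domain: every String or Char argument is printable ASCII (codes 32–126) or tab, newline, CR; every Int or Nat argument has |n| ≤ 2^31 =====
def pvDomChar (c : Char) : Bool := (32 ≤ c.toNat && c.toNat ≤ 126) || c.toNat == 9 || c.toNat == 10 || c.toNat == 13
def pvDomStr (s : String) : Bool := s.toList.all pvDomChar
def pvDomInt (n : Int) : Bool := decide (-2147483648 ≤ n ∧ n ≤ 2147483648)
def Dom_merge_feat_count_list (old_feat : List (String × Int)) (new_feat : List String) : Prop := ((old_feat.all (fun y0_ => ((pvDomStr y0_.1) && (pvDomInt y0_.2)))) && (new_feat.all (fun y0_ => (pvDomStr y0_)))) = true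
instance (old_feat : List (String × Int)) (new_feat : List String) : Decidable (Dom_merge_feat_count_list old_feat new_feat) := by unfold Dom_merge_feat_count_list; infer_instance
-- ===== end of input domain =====

-- B replaces A's per-occurrence filter+index scans by one counting pass over new_feat,
-- one merge pass over old_feat and an append of the leftover counts (objective: faster).
-- A mutates old_feat in place (B's Python does the same); the equivalence proved here is
-- about the RETURN value.

-- ===== PORT A =====
-- one iteration of A's 'for feat in new_feat' loop
def pvStepA (acc : List (String × Int)) (feat : String) : List (String × Int) :=
  let old_data := acc.filter (fun item => item.1 == feat)
  match old_data with
  | [] => acc ++ [(feat, 1)]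
  | d0 :: _ =>
    match PySem.List.index? acc d0 with
    | some i =>
      match acc[i]? with
      | some p => acc.set i (feat, p.2 + 1)
      | none => acc   -- unreachable: index? returns a valid index
    | none => acc     -- unreachable: d0 ∈ acc

def merge_feat_count_list (old_feat : List (String × Int)) (new_feat : List String) : List (String × Int) :=
  new_feat.foldl pvStepA old_feat

-- ===== PORT B =====
-- counts = {}; for feat in new_feat: counts[feat] = counts.get(feat, 0) + 1
def pvCounts (new_feat : List String) : PySem.Dict String Int :=
  new_feat.foldl (fun d f => d.insert f (d.getD f 0 + 1)) PySem.Dict.empty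

-- the 'for i in range(len(old_feat))' merge pass: rebuilds old_feat, threading counts
def pvMergePass (old : List (String × Int)) (d : PySem.Dict String Int) :
    List (String × Int) × PySem.Dict String Int :=
  match old with
  | [] => ([], d)
  | (k, v) :: rest =>
    if d.contains k then
      match d.pop? k with
      | some (c, d') =>
        let p := pvMergePass rest d'
        ((k, v + c) :: p.1, p.2)
      | none =>      -- unreachable: contains k
        let p := pvMergePass rest d
        ((k, v) :: p.1, p.2)
    else
      let p := pvMergePass rest d
      ((k, v) :: p.1, p.2)

def merge_feat_count_list_alt (old_feat : List (String × Int)) (new_feat : List String) : List (String × Int) :=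
  let p := pvMergePass old_feat (pvCounts new_feat)
  p.1 ++ p.2.items

-- ===== PRECONDITION & SPEC =====
def Spec_merge_feat_count_list (old_feat : List (String × Int)) (new_feat : List String) (out : List (String × Int)) : Prop := out = merge_feat_count_list_alt old_feat new_feat
instance (old_feat : List (String × Int)) (new_feat : List String) (out : List (String × Int)) : Decidable (Spec_merge_feat_count_list old_feat new_feat out) := by unfold Spec_merge_feat_count_list; infer_instance

-- ===== CLAIM (what is proved, stated in full; the proofs are below) =====
def Claim_equal_merge_feat_count_list : Prop := ∀ (old_feat : List (String × Int)) (new_feat : List String), Dom_merge_feat_count_list old_feat new_feat → Spec_merge_feat_count_list old_feat new_feat (merge_feat_count_list old_feat new_feat)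

-- ===== LEMMAS AND PROOFS =====

-- 'bump l f': increment the first pair with key f, or append (f, 1): what one A-iteration does
def pvBump : List (String × Int) → String → List (String × Int)
  | [], f => [(f, 1)]
  | (k, v) :: rest, f => if k = f then (k, v + 1) :: rest else (k, v) :: pvBump rest f

lemma pvBump_of_not_mem (l : List (String × Int)) (f : String)
    (h : ∀ p ∈ l, p.1 ≠ f) : pvBump l f = l ++ [(f, 1)] := by
  induction l with
  | nil => rfl
  | cons p rest ih =>
    obtain ⟨k, v⟩ := p
    have hk : k ≠ f := h (k, v) (by simp)
    simp [pvBump, hk, ih (fun q hq => h q (by simp [hq]))]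

lemma pvStepA_eq_bump (acc : List (String × Int)) (f : String) :
    pvStepA acc f = pvBump acc f := by
  induction acc with
  | nil => rfl
  | cons p rest ih =>
    obtain ⟨k, v⟩ := p
    by_cases hk : k = f
    · subst hk
      simp [pvStepA, pvBump, PySem.List.index?, List.idxOf?, List.findIdx?_cons]
    · have hkb : (k == f) = false := by simp [hk]
      rcases hfil : rest.filter (fun item => item.1 == f) with _ | ⟨d0, ds⟩
      · -- no match anywhere: append branch on both sides
        have hnm : ∀ p ∈ (k, v) :: rest, p.1 ≠ f := by
          intro q hq he
          rcases List.mem_cons.mp hq with hq1 | hq2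
          · exact hk (by rw [hq1] at he; exact he)
          · have : q ∈ rest.filter (fun item => item.1 == f) :=
              List.mem_filter.mpr ⟨hq2, by simp [he]⟩
            rw [hfil] at this; cases this
        simp [pvStepA, List.filter, hkb, hfil, pvBump_of_not_mem _ _ hnm]
      · -- match in rest
        have hd0 : d0 ∈ rest.filter (fun item => item.1 == f) := by simp [hfil]
        have hd0f : d0.1 = f := by
          have := (List.mem_filter.mp hd0).2; simpa using this
        have hne : (k, v) ≠ d0 := fun he => hk (by rw [← he] at hd0f; exact hd0f)
        have hidx : PySem.List.index? ((k, v) :: rest) d0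
            = (PySem.List.index? rest d0).map (· + 1) :=
          PySem.List.index?_cons_of_ne _ hne
        have hmem : d0 ∈ rest := (List.mem_filter.mp hd0).1
        rcases hri : PySem.List.index? rest d0 with _ | i
        · exact absurd ((PySem.List.index?_eq_none_iff rest d0).mp hri) (by simp [hmem])
        · have hlt : i < rest.length := by
            obtain ⟨hk', _, _⟩ := PySem.List.getElem_of_index?_eq_some hri
            exact hk'
          simp only [pvStepA, List.filter, hkb, hfil, hidx, hri, Option.map_some]
          simp only [List.getElem?_cons_succ, List.set_cons_succ,
            List.getElem?_eq_getElem hlt]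
          have := ih
          simp only [pvStepA, hfil, hri, List.getElem?_eq_getElem hlt] at this
          simp [pvBump, hk, ← this]

-- items of 'counts[f] = counts.get(f,0)+1' on a nodup-keyed dict is a bump of the items
lemma items_cadd (l : List (String × Int)) (f : String)
    (h : (l.map Prod.fst).Nodup) :
    ((PySem.Dict.mk l).insert f ((PySem.Dict.mk l).getD f 0 + 1)).items = pvBump l f := by
  induction l with
  | nil => simp [PySem.Dict.insert, PySem.Dict.contains, PySem.Dict.getD,
      PySem.Dict.get?, pvBump]
  | cons p rest ih =>
    obtain ⟨k, v⟩ := p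
    simp only [List.map_cons, List.nodup_cons] at h
    obtain ⟨hknr, hnr⟩ := h
    by_cases hk : k = f
    · subst hk
      have hrest : ∀ q ∈ rest, q.1 ≠ k := by
        intro q hq he
        exact hknr (List.mem_map.mpr ⟨q, hq, he⟩)
      have hmap : ∀ q ∈ rest, (fun p => if p.1 = k then (k, v + 1) else p) q = id q := by
        intro q hq; simp [hrest q hq]
      simp [PySem.Dict.insert, PySem.Dict.contains, PySem.Dict.getD, PySem.Dict.get?,
        pvBump]
      rw [List.map_congr_left hmap, List.map_id]
    · have hkb : (k == f) = false := by simp [hk]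
      have hcont : (PySem.Dict.mk ((k, v) :: rest)).contains f
          = (PySem.Dict.mk rest).contains f := by
        simp [PySem.Dict.contains, hkb]
      have hgetD : (PySem.Dict.mk ((k, v) :: rest)).getD f 0
          = (PySem.Dict.mk rest).getD f 0 := by
        simp [PySem.Dict.getD, PySem.Dict.get?, List.find?, hkb]
      by_cases hc : (PySem.Dict.mk rest).contains f = true
      · simp only [PySem.Dict.insert, hcont, hc, if_true, hgetD]
        have ihr := ih hnr
        simp only [PySem.Dict.insert, hc, if_true] at ihr
        simp [pvBump, hk, ← ihr]
      · have hc' : (PySem.Dict.mk rest).contains f = false := Bool.eq_false_iff.mpr hc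
        simp only [PySem.Dict.insert, hcont, hc', Bool.false_eq_true, if_false, hgetD]
        have ihr := ih hnr
        simp only [PySem.Dict.insert, hc', Bool.false_eq_true, if_false] at ihr
        simp [pvBump, hk, ← ihr]

-- abbreviations for the proofs
def pvCadd (d : PySem.Dict String Int) (f : String) : PySem.Dict String Int :=
  d.insert f (d.getD f 0 + 1)

def pvMergeB (old : List (String × Int)) (d : PySem.Dict String Int) : List (String × Int) :=
  (pvMergePass old d).1 ++ (pvMergePass old d).2.items

lemma pv_erase_of_not_contains (d : PySem.Dict String Int) (f : String)
    (h : d.contains f = false) : d.erase f = d := by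
  obtain ⟨l⟩ := d
  simp only [PySem.Dict.contains, List.any_eq_false] at h
  apply PySem.Dict.ext
  simp only [PySem.Dict.erase]
  exact List.filter_eq_self.mpr (fun q hq => by simp [h q hq])

lemma pv_contains_erase_ne (d : PySem.Dict String Int) (k f : String) (h : k ≠ f) :
    (d.erase k).contains f = d.contains f := by
  obtain ⟨l⟩ := d
  simp only [PySem.Dict.erase, PySem.Dict.contains]
  induction l with
  | nil => rfl
  | cons q t ih =>
    by_cases hq : q.1 = k
    · have hb : (q.1 == k) = true := by simp [hq]
      have hf : (q.1 == f) = false := by simp [hq, h]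
      rw [List.filter_cons, List.any_cons, hb, hf]
      simpa using ih
    · have hb : (q.1 == k) = false := by simp [hq]
      rw [List.filter_cons, hb]
      simp only [Bool.not_false, if_true, List.any_cons]
      rw [ih]

lemma pv_get?_erase_ne (d : PySem.Dict String Int) (k f : String) (h : k ≠ f) :
    (d.erase k).get? f = d.get? f := by
  obtain ⟨l⟩ := d
  simp only [PySem.Dict.erase, PySem.Dict.get?]
  induction l with
  | nil => rfl
  | cons q t ih =>
    by_cases hq : q.1 = k
    · have hb : (q.1 == k) = true := by simp [hq]
      have hf : (q.1 == f) = false := by simp [hq, h]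
      rw [List.filter_cons, hb]
      simp only [Bool.not_true, Bool.false_eq_true, if_false]
      simp only [List.find?_cons, hf]
      exact ih
    · have hb : (q.1 == k) = false := by simp [hq]
      rw [List.filter_cons, hb]
      simp only [Bool.not_false, if_true]
      by_cases hqf : q.1 = f
      · have hf : (q.1 == f) = true := by simp [hqf]
        simp only [List.find?_cons, hf]
      · have hf : (q.1 == f) = false := by simp [hqf]
        simp only [List.find?_cons, hf]
        exact ih

lemma pv_erase_insert_ne (d : PySem.Dict String Int) (k f : String) (w : Int)
    (h : k ≠ f) : (d.insert f w).erase k = (d.erase k).insert f w := by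
  obtain ⟨l⟩ := d
  have hcont : ({ items := List.filter (fun p => !(p.1 == k)) l } :
      PySem.Dict String Int).contains f = (PySem.Dict.mk l).contains f := by
    have := pv_contains_erase_ne (PySem.Dict.mk l) k f h
    simpa only [PySem.Dict.erase] using this
  have hfk : (f == k) = false := by simp [Ne.symm h]
  by_cases hc : (PySem.Dict.mk l).contains f = true
  · have hcont2 : ({ items := List.filter (fun p => !(p.1 == k)) l } :
        PySem.Dict String Int).contains f = true := by rw [hcont]; exact hc
    apply PySem.Dict.ext
    simp only [PySem.Dict.insert, hc, hcont2, if_true, PySem.Dict.erase]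
    rw [List.filter_map]
    have h1 : ∀ q ∈ l, ((fun p => !(p.1 == k)) ∘
        (fun p => if (p.1 == f) = true then (f, w) else p)) q = (!(q.1 == k)) := by
      intro q hq
      by_cases hqf : q.1 = f <;> simp [hqf, hfk]
    rw [List.filter_congr h1]
  · have hc' : (PySem.Dict.mk l).contains f = false := Bool.eq_false_iff.mpr hc
    have hcont2 : ({ items := List.filter (fun p => !(p.1 == k)) l } :
        PySem.Dict String Int).contains f = false := by rw [hcont]; exact hc'
    apply PySem.Dict.ext
    simp only [PySem.Dict.insert, hc', hcont2, Bool.false_eq_true, if_false,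
      PySem.Dict.erase]
    simp [List.filter_append, hfk]

lemma pv_erase_insert_self (d : PySem.Dict String Int) (f : String) (w : Int) :
    (d.insert f w).erase f = d.erase f := by
  obtain ⟨l⟩ := d
  by_cases hc : (PySem.Dict.mk l).contains f = true
  · apply PySem.Dict.ext
    simp only [PySem.Dict.insert, hc, if_true, PySem.Dict.erase]
    rw [List.filter_map]
    have h1 : ∀ q ∈ l, ((fun p => !(p.1 == f)) ∘
        (fun p => if (p.1 == f) = true then (f, w) else p)) q = (!(q.1 == f)) := by
      intro q hq
      by_cases hqf : q.1 = f <;> simp [hqf]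
    rw [List.filter_congr h1]
    have h2 : ∀ q ∈ l.filter (fun p => !(p.1 == f)),
        (fun p => if (p.1 == f) = true then (f, w) else p) q = id q := by
      intro q hq
      have := (List.mem_filter.mp hq).2
      simp at this
      simp [this]
    rw [List.map_congr_left h2, List.map_id]
  · have hc' : (PySem.Dict.mk l).contains f = false := Bool.eq_false_iff.mpr hc
    apply PySem.Dict.ext
    simp only [PySem.Dict.insert, hc', Bool.false_eq_true, if_false, PySem.Dict.erase]
    simp [List.filter_append, List.filter]

lemma pv_erase_cadd_comm (d : PySem.Dict String Int) (k f : String) (h : k ≠ f) :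
    (pvCadd d f).erase k = pvCadd (d.erase k) f := by
  unfold pvCadd
  rw [pv_erase_insert_ne d k f _ h]
  have : (d.erase k).getD f 0 = d.getD f 0 := by
    simp [PySem.Dict.getD, pv_get?_erase_ne d k f h]
  rw [this]

lemma pv_nodup_keys_erase (d : PySem.Dict String Int) (k : String)
    (h : d.keys.Nodup) : (d.erase k).keys.Nodup := by
  obtain ⟨l⟩ := d
  simp only [PySem.Dict.keys, PySem.Dict.erase] at *
  exact List.Nodup.sublist (List.Sublist.map Prod.fst (List.filter_sublist)) h

lemma pv_get?_cadd_ne (d : PySem.Dict String Int) (k f : String) (h : k ≠ f) :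
    (pvCadd d f).get? k = d.get? k :=
  PySem.Dict.get?_insert_of_ne d _ h

-- the key lemma: adding one occurrence of f to the counts bumps the merged result
lemma pv_mergeB_cadd (old : List (String × Int)) (d : PySem.Dict String Int)
    (f : String) (h : d.keys.Nodup) :
    pvMergeB old (pvCadd d f) = pvBump (pvMergeB old d) f := by
  induction old generalizing d with
  | nil =>
    obtain ⟨l⟩ := d
    simp only [pvMergeB, pvMergePass]
    simpa using items_cadd l f (by simpa [PySem.Dict.keys] using h)
  | cons p rest ih =>
    obtain ⟨k, v⟩ := p
    by_cases hk : k = f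
    · subst hk
      rcases hq : d.get? k with _ | c
      · -- k not in d; in cadd d k it maps to 1
        have hcd : d.contains k = false := by
          rw [PySem.Dict.contains_eq_isSome_get?, hq]; rfl
        have hgd : d.getD k 0 = 0 := by simp [PySem.Dict.getD, hq]
        have hq' : (pvCadd d k).get? k = some 1 := by
          unfold pvCadd; rw [PySem.Dict.get?_insert_self, hgd]; norm_num
        have hc' : (pvCadd d k).contains k = true := by
          rw [PySem.Dict.contains_eq_isSome_get?, hq']; rfl
        have her : (pvCadd d k).erase k = d := by
          unfold pvCadd
          rw [pv_erase_insert_self, pv_erase_of_not_contains d k hcd]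
        simp only [pvMergeB, pvMergePass, hc', if_true, PySem.Dict.pop?, hq',
          Option.map_some, her, hcd, Bool.false_eq_true, if_false]
        simp [pvBump]
      · -- k in d with count c
        have hcd : d.contains k = true := by
          rw [PySem.Dict.contains_eq_isSome_get?, hq]; rfl
        have hgd : d.getD k 0 = c := by simp [PySem.Dict.getD, hq]
        have hq' : (pvCadd d k).get? k = some (c + 1) := by
          unfold pvCadd; rw [PySem.Dict.get?_insert_self, hgd]
        have hc' : (pvCadd d k).contains k = true := by
          rw [PySem.Dict.contains_eq_isSome_get?, hq']; rfl
        have her : (pvCadd d k).erase k = d.erase k := pv_erase_insert_self d k _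
        simp only [pvMergeB, pvMergePass, hc', hcd, if_true, PySem.Dict.pop?, hq, hq',
          Option.map_some, her]
        simp [pvBump]
        omega
    · have hgk : (pvCadd d f).get? k = d.get? k := pv_get?_cadd_ne d k f hk
      have hck : (pvCadd d f).contains k = d.contains k := by
        rw [PySem.Dict.contains_eq_isSome_get?, PySem.Dict.contains_eq_isSome_get?, hgk]
      rcases hq : d.get? k with _ | c
      · have hcd : d.contains k = false := by
          rw [PySem.Dict.contains_eq_isSome_get?, hq]; rfl
        simp only [pvMergeB, pvMergePass, hck, hcd, Bool.false_eq_true, if_false]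
        have := ih d h
        simp only [pvMergeB] at this
        simp [pvBump, hk, this]
      · have hcd : d.contains k = true := by
          rw [PySem.Dict.contains_eq_isSome_get?, hq]; rfl
        have hcomm : (pvCadd d f).erase k = pvCadd (d.erase k) f :=
          pv_erase_cadd_comm d k f hk
        simp only [pvMergeB, pvMergePass, hck, hcd, if_true, PySem.Dict.pop?, hgk, hq,
          Option.map_some, hcomm]
        have := ih (d.erase k) (pv_nodup_keys_erase d k h)
        simp only [pvMergeB] at this
        simp [pvBump, hk, this]

lemma pv_mergeB_empty (old : List (String × Int)) :
    pvMergeB old PySem.Dict.empty = old := by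
  induction old with
  | nil => rfl
  | cons p rest ih =>
    obtain ⟨k, v⟩ := p
    have hc : (PySem.Dict.empty : PySem.Dict String Int).contains k = false := rfl
    simp only [pvMergeB, pvMergePass, hc, Bool.false_eq_true, if_false]
    simpa [pvMergeB] using ih

lemma pv_nodup_keys_cadd (d : PySem.Dict String Int) (f : String)
    (h : d.keys.Nodup) : (pvCadd d f).keys.Nodup :=
  PySem.Dict.nodup_keys_insert d f _ h

-- generalized counting invariant
lemma pv_mergeB_foldl (new : List String) (old : List (String × Int))
    (d : PySem.Dict String Int) (h : d.keys.Nodup) :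
    pvMergeB old (new.foldl pvCadd d) = new.foldl pvBump (pvMergeB old d) := by
  induction new generalizing d with
  | nil => rfl
  | cons f ns ih =>
    simp only [List.foldl_cons]
    rw [ih (pvCadd d f) (pv_nodup_keys_cadd d f h), pv_mergeB_cadd old d f h]

-- ===== VERDICT (by name: the statement is the Claim_ definition above) =====
theorem merge_feat_count_list_spec : Claim_equal_merge_feat_count_list := by
  intro old_feat new_feat _
  unfold Spec_merge_feat_count_list
  have hA : merge_feat_count_list old_feat new_feat = new_feat.foldl pvBump old_feat := by
    unfold merge_feat_count_list
    congr 1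
    funext acc f
    exact pvStepA_eq_bump acc f
  have hB : merge_feat_count_list_alt old_feat new_feat
      = pvMergeB old_feat (new_feat.foldl pvCadd PySem.Dict.empty) := rfl
  rw [hA, hB, pv_mergeB_foldl new_feat old_feat PySem.Dict.empty (by simp [PySem.Dict.empty, PySem.Dict.keys]),
    pv_mergeB_empty]
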